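-- pv_equiv track=rewrite | github.com/lumenintellects/plora | swarm/graph_engine.py | build_topology
-- ===== SOURCE A (Python) =====
-- from typing import Dict, List, Mapping, MutableMapping, Sequence, Set
--
-- def build_topology(kind: str, n: int) -> Dict[int, List[int]]:
--     """Return adjacency list mapping node_id -> list(neighbour_ids)."""
--     if kind == "line":
--         return {
--             i: [j for j in (i - 1, i + 1) if 0 <= j < n] for i in range(n)
--         }
--     if kind == "mesh":
--         return {i: [j for j in range(n) if j != i] for i in range(n)}
--     raise ValueError(f"Unknown topology kind: {kind}")
-- ===== SOURCE B (Python) =====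
-- def build_topology(kind: str, n: int):
--     """Return adjacency list mapping node_id -> list(neighbour_ids)."""
--     if kind == "line":
--         edges = [(i, i + 1) for i in range(n - 1)]
--     elif kind == "mesh":
--         edges = [(i, j) for i in range(n) for j in range(i + 1, n)]
--     else:
--         raise ValueError(f"Unknown topology kind: {kind}")
--     adj = {i: [] for i in range(n)}
--     for u, v in edges:
--         adj[u].append(v)
--         adj[v].append(u)
--     return adj
-- ===== Notes on version B (the rewrite author's own statement) =====
-- stated objective: alternative
-- what changed: B enumerates the undirected edge set once (consecutive pairs for 'line', the upper-triangle pairs for 'mesh') and inserts each edge symmetrically into pre-initialized empty adjacency lists, instead of A's per-node comprehensions that filter candidate neighbours; Pre_ excludes unknown kinds, on which both raise ValueError.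
import Mathlib
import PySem

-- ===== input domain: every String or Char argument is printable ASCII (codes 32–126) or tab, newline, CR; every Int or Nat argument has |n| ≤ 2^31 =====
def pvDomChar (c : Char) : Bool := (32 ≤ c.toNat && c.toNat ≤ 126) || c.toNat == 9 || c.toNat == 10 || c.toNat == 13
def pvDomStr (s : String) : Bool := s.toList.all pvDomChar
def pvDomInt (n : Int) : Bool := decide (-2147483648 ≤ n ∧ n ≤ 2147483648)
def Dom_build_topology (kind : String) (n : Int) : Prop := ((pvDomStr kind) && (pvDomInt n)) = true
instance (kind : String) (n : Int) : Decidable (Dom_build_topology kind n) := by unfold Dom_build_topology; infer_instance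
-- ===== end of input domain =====

-- B builds the adjacency lists edge-by-edge (symmetric insertion into pre-initialized empty lists)
-- instead of A's per-node comprehensions filtering candidate neighbours; same asymptotic cost ("alternative").
-- Pre_ excludes unknown kinds, on which both Pythons raise the same ValueError.


-- ===== PORT A =====
def build_topology (kind : String) (n : Int) : List (Int × List Int) :=
  if kind == "line" then
    (PySem.List.pyRange 0 n 1).map (fun i =>
      (i, [i - 1, i + 1].filter (fun j => decide (0 ≤ j) && decide (j < n))))
  else if kind == "mesh" then
    (PySem.List.pyRange 0 n 1).map (fun i =>
      (i, (PySem.List.pyRange 0 n 1).filter (fun j => j != i)))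
  else []  -- A raises ValueError here (outside Pre_)

-- ===== PORT B =====
def altEdges (kind : String) (n : Int) : List (Int × Int) :=
  if kind == "line" then
    (PySem.List.pyRange 0 (n - 1) 1).map (fun i => (i, i + 1))
  else
    (PySem.List.pyRange 0 n 1).flatMap (fun i =>
      (PySem.List.pyRange (i + 1) n 1).map (fun j => (i, j)))

def addEdge (d : PySem.Dict Int (List Int)) (e : Int × Int) : PySem.Dict Int (List Int) :=
  (d.modify e.1 [] (· ++ [e.2])).modify e.2 [] (· ++ [e.1])

def build_topology_alt (kind : String) (n : Int) : List (Int × List Int) :=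
  if kind == "line" || kind == "mesh" then
    ((altEdges kind n).foldl addEdge
      ((PySem.List.pyRange 0 n 1).foldl (fun d i => d.insert i ([] : List Int))
        PySem.Dict.empty)).items
  else []  -- B raises ValueError here (outside Pre_)

-- ===== PRECONDITION & SPEC =====
-- Pre_ excludes kinds other than "line"/"mesh": there A (and B) raises ValueError.
def Pre_build_topology (kind : String) (n : Int) : Prop := kind = "line" ∨ kind = "mesh"
instance (kind : String) (n : Int) : Decidable (Pre_build_topology kind n) := by
  unfold Pre_build_topology; infer_instance

def pvWitness_build_topology : String × Int := ("line", 3)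

def Spec_build_topology (kind : String) (n : Int) (out : List (Int × List Int)) : Prop :=
  out = build_topology_alt kind n
instance (kind : String) (n : Int) (out : List (Int × List Int)) :
    Decidable (Spec_build_topology kind n out) := by unfold Spec_build_topology; infer_instance

-- ===== CLAIM (what is proved, stated in full; the proofs are below) =====
def Claim_equal_build_topology : Prop := ∀ (kind : String) (n : Int),
  Dom_build_topology kind n → Pre_build_topology kind n →
  Spec_build_topology kind n (build_topology kind n)

-- ===== LEMMAS AND PROOFS =====

-- neighbours contributed to node i by an edge list, in edge order
def nbOf (es : List (Int × Int)) (i : Int) : List Int :=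
  es.filterMap (fun e => if e.1 = i then some e.2 else if e.2 = i then some e.1 else none)

theorem getD_mk_map (f : Int → List Int) (l : List Int) (u : Int) (hu : u ∈ l) :
    (PySem.Dict.mk (l.map fun i => (i, f i))).getD u [] = f u := by
  induction l with
  | nil => cases hu
  | cons a l ih =>
    by_cases hau : a = u
    · subst hau
      simp [PySem.Dict.getD, PySem.Dict.get?]
    · have hu' : u ∈ l := by cases hu with
        | head => exact absurd rfl hau
        | tail _ h => exact h
      have := ih hu'
      simpa [PySem.Dict.getD, PySem.Dict.get?, hau] using this

theorem modify_mk_map (f : Int → List Int) (l : List Int) (u : Int) (hu : u ∈ l)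
    (g : List Int → List Int) :
    (PySem.Dict.mk (l.map fun i => (i, f i))).modify u [] g
      = PySem.Dict.mk (l.map fun i => (i, if i = u then g (f i) else f i)) := by
  have hc : (PySem.Dict.mk (l.map fun i => (i, f i))).contains u = true := by
    rw [PySem.Dict.contains, List.any_eq_true]
    exact ⟨(u, f u), List.mem_map.mpr ⟨u, hu, rfl⟩, by simp⟩
  rw [PySem.Dict.modify, getD_mk_map f l u hu, PySem.Dict.insert, if_pos hc]
  congr 1
  rw [List.map_map]
  apply List.map_congr_left
  intro i _
  by_cases hiu : i = u
  · subst hiu; simp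
  · simp [hiu]

theorem addEdge_mk_map (f : Int → List Int) (l : List Int) (u v : Int)
    (hu : u ∈ l) (hv : v ∈ l) (huv : u ≠ v) :
    addEdge (PySem.Dict.mk (l.map fun i => (i, f i))) (u, v)
      = PySem.Dict.mk (l.map fun i =>
          (i, if i = u then f i ++ [v] else if i = v then f i ++ [u] else f i)) := by
  unfold addEdge
  rw [modify_mk_map f l u hu]
  rw [modify_mk_map (fun i => if i = u then f i ++ [v] else f i) l v hv]
  congr 1
  apply List.map_congr_left
  intro i _
  by_cases hiu : i = u <;> by_cases hiv : i = v
  · subst hiu; exact absurd hiv huv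
  · subst hiu; simp [huv]
  · subst hiv; simp [Ne.symm huv]
  · simp [hiu, hiv]

theorem foldl_addEdge_mk_map (es : List (Int × Int)) (l : List Int) (f : Int → List Int)
    (hes : ∀ e ∈ es, e.1 ∈ l ∧ e.2 ∈ l ∧ e.1 ≠ e.2) :
    es.foldl addEdge (PySem.Dict.mk (l.map fun i => (i, f i)))
      = PySem.Dict.mk (l.map fun i => (i, f i ++ nbOf es i)) := by
  induction es generalizing f with
  | nil => simp [nbOf]
  | cons e es ih =>
    obtain ⟨hu, hv, huv⟩ := hes e (List.mem_cons_self ..)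
    obtain ⟨u, v⟩ := e
    simp only [] at hu hv huv
    rw [List.foldl_cons, addEdge_mk_map f l u v hu hv huv,
      ih (fun i => if i = u then f i ++ [v] else if i = v then f i ++ [u] else f i)
        (fun e he => hes e (List.mem_cons_of_mem _ he))]
    congr 1
    apply List.map_congr_left
    intro i _
    have hcons : nbOf ((u, v) :: es) i
        = (if u = i then [v] else if v = i then [u] else []) ++ nbOf es i := by
      simp only [nbOf, List.filterMap_cons]
      split_ifs <;> simp
    rw [hcons]
    by_cases hiu : i = u
    · rw [if_pos hiu, if_pos hiu.symm, List.append_assoc]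
    · by_cases hiv : i = v
      · rw [if_neg hiu, if_pos hiv, if_neg (fun h => hiu h.symm), if_pos hiv.symm,
          List.append_assoc]
      · rw [if_neg hiu, if_neg hiv, if_neg (fun h => hiu h.symm),
          if_neg (fun h => hiv h.symm), List.nil_append]

theorem foldl_insert_mk (l : List Int) (acc : List (Int × List Int))
    (hl : l.Nodup) (h : ∀ i ∈ l, ∀ p ∈ acc, p.1 ≠ i) :
    l.foldl (fun d i => d.insert i ([] : List Int)) (PySem.Dict.mk acc)
      = PySem.Dict.mk (acc ++ l.map fun i => (i, [])) := by
  induction l generalizing acc with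
  | nil => simp
  | cons a l ih =>
    have hca : (PySem.Dict.mk acc).contains a = false := by
      rw [PySem.Dict.contains, List.any_eq_false]
      intro p hp
      simpa using h a (by simp) p hp
    rw [List.foldl_cons]
    have step : (PySem.Dict.mk acc).insert a ([] : List Int)
        = PySem.Dict.mk (acc ++ [(a, [])]) := by
      rw [PySem.Dict.insert, if_neg (by simp [hca])]
    rw [step, ih (acc ++ [(a, ([] : List Int))]) hl.of_cons]
    · simp
    · intro i hi p hp
      rcases List.mem_append.mp hp with hp | hp
      · exact h i (List.mem_cons_of_mem _ hi) p hp
      · simp at hp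
        subst hp
        intro hia
        have ha : a = i := by simpa using hia
        exact (List.nodup_cons.mp hl).1 (by rw [ha]; exact hi)

-- filterMap of a function supported on at most two points x < y, over an integer range
theorem filterMap_pyRange_two (h : Int → Option Int) (x y : Int) (hxy : x < y)
    (h0 : ∀ u, u ≠ x → u ≠ y → h u = none) :
    ∀ (k : Nat) (a b : Int), (b - a).toNat ≤ k →
    (PySem.List.pyRange a b 1).filterMap h
      = (if a ≤ x ∧ x < b then (h x).toList else [])
        ++ (if a ≤ y ∧ y < b then (h y).toList else []) := by
  intro k
  induction k with
  | zero =>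
    intro a b hk
    have hab : b ≤ a := by omega
    rw [PySem.List.pyRange_one_eq_nil hab]
    rw [if_neg (by omega), if_neg (by omega)]
    rfl
  | succ k ih =>
    intro a b hk
    by_cases hab : b ≤ a
    · rw [PySem.List.pyRange_one_eq_nil hab]
      rw [if_neg (by omega), if_neg (by omega)]
      rfl
    · rw [PySem.List.pyRange_one_cons (by omega : a < b), List.filterMap_cons,
        ih (a + 1) b (by omega)]
      by_cases hax : a = x
      · subst hax
        rw [if_neg (show ¬ (a + 1 ≤ a ∧ a < b) from by omega),
          if_congr (show (a + 1 ≤ y ∧ y < b) ↔ (a ≤ y ∧ y < b) from by omega) rfl rfl,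
          if_pos (show a ≤ a ∧ a < b from by omega)]
        cases hha : h a <;> simp
      · by_cases hay : a = y
        · subst hay
          rw [if_neg (show ¬ (a + 1 ≤ x ∧ x < b) from by omega),
            if_neg (show ¬ (a + 1 ≤ a ∧ a < b) from by omega),
            if_neg (show ¬ (a ≤ x ∧ x < b) from by omega),
            if_pos (show a ≤ a ∧ a < b from by omega)]
          cases hha : h a <;> simp
        · rw [h0 a hax hay,
            if_congr (show (a + 1 ≤ x ∧ x < b) ↔ (a ≤ x ∧ x < b) from by omega) rfl rfl,
            if_congr (show (a + 1 ≤ y ∧ y < b) ↔ (a ≤ y ∧ y < b) from by omega) rfl rfl]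

-- filterMap of a function supported on a single point x, over an integer range
theorem filterMap_pyRange_one_pt (h : Int → Option Int) (x : Int)
    (h0 : ∀ u, u ≠ x → h u = none) :
    ∀ (k : Nat) (a b : Int), (b - a).toNat ≤ k →
    (PySem.List.pyRange a b 1).filterMap h
      = if a ≤ x ∧ x < b then (h x).toList else [] := by
  intro k
  induction k with
  | zero =>
    intro a b hk
    rw [PySem.List.pyRange_one_eq_nil (by omega), if_neg (by omega)]
    rfl
  | succ k ih =>
    intro a b hk
    by_cases hab : b ≤ a
    · rw [PySem.List.pyRange_one_eq_nil hab, if_neg (by omega)]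
      rfl
    · rw [PySem.List.pyRange_one_cons (by omega : a < b), List.filterMap_cons,
        ih (a + 1) b (by omega)]
      by_cases hax : a = x
      · subst hax
        rw [if_neg (show ¬ (a + 1 ≤ a ∧ a < b) from by omega),
          if_pos (show a ≤ a ∧ a < b from by omega)]
        cases hha : h a <;> simp
      · rw [h0 a hax,
          if_congr (show (a + 1 ≤ x ∧ x < b) ↔ (a ≤ x ∧ x < b) from by omega) rfl rfl]

-- per-node value of B on the line edges
theorem nbOf_line (n i : Int) (hi0 : 0 ≤ i) (hin : i < n) :
    nbOf ((PySem.List.pyRange 0 (n - 1) 1).map fun u => (u, u + 1)) i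
      = [i - 1, i + 1].filter (fun j => decide (0 ≤ j) && decide (j < n)) := by
  unfold nbOf
  rw [List.filterMap_map]
  rw [show ((fun e : Int × Int => if e.1 = i then some e.2 else if e.2 = i then some e.1 else none)
      ∘ fun u => (u, u + 1))
      = (fun u => if u = i then some (u + 1) else if u + 1 = i then some u else none) from rfl]
  rw [filterMap_pyRange_two
    (fun u => if u = i then some (u + 1) else if u + 1 = i then some u else none)
    (i - 1) i (by omega)
    (by intro u h1 h2; simp [h2, show u + 1 ≠ i from by omega])
    (n - 1 - 0).toNat 0 (n - 1) (le_refl _)]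
  have e1 : (if (i - 1 : Int) = i then some (i - 1 + 1) else if (i - 1) + 1 = i then some (i - 1) else none)
      = some (i - 1) := by rw [if_neg (by omega), if_pos (by omega)]
  have e2 : (if (i : Int) = i then some (i + 1) else if i + 1 = i then some i else none)
      = some (i + 1) := by rw [if_pos rfl]
  rw [e1, e2]
  have hA : [i - 1, i + 1].filter (fun j => decide (0 ≤ j) && decide (j < n))
      = (if 0 ≤ i - 1 ∧ i - 1 < n then [i - 1] else [])
        ++ (if 0 ≤ i + 1 ∧ i + 1 < n then [i + 1] else []) := by
    simp only [List.filter_cons, List.filter_nil]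
    by_cases h1 : (1 : Int) ≤ i <;> by_cases h2 : i + 1 < n <;>
      simp [h1, h2, show (0 : Int) ≤ i + 1 by omega, show i - 1 < n by omega]
  rw [hA,
    if_congr (show ((0 : Int) ≤ i - 1 ∧ i - 1 < n - 1) ↔ (0 ≤ i - 1 ∧ i - 1 < n) from by omega) rfl rfl,
    if_congr (show ((0 : Int) ≤ i ∧ i < n - 1) ↔ (0 ≤ i + 1 ∧ i + 1 < n) from by omega) rfl rfl]
  simp

-- per-node value of B on the mesh edges
theorem nbOf_mesh (n i : Int) (hi0 : 0 ≤ i) (hin : i < n) :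
    nbOf ((PySem.List.pyRange 0 n 1).flatMap fun u =>
        (PySem.List.pyRange (u + 1) n 1).map fun v => (u, v)) i
      = (PySem.List.pyRange 0 n 1).filter (fun j => j != i) := by
  unfold nbOf
  rw [List.filterMap_flatMap]
  have hpt : ∀ u : Int, u ≠ i →
      ((PySem.List.pyRange (u + 1) n 1).map fun v => (u, v)).filterMap
        (fun e : Int × Int => if e.1 = i then some e.2 else if e.2 = i then some e.1 else none)
      = if u < i then [u] else [] := by
    intro u hui
    rw [List.filterMap_map]
    have hfun : ((fun e : Int × Int => if e.1 = i then some e.2 else if e.2 = i then some e.1 else none)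
        ∘ fun v => (u, v)) = fun v => if v = i then some u else none := by
      funext v
      simp [hui]
    rw [hfun,
      filterMap_pyRange_one_pt (fun v => if v = i then some u else none) i
        (by intro v hv; simp [hv]) (n - (u + 1)).toNat (u + 1) n (le_refl _)]
    by_cases hlt : u < i
    · rw [if_pos (by omega), if_pos hlt]; simp
    · rw [if_neg (by omega), if_neg hlt]
  have hflat : ∀ (L : List Int), (∀ u ∈ L, u ≠ i) →
      (L.flatMap fun u =>
        ((PySem.List.pyRange (u + 1) n 1).map fun v => (u, v)).filterMap
          (fun e : Int × Int => if e.1 = i then some e.2 else if e.2 = i then some e.1 else none))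
      = L.flatMap fun u => if u < i then [u] else [] := by
    intro L hL
    apply List.flatMap_congr
    intro u hu
    exact hpt u (hL u hu)
  rw [PySem.List.pyRange_one_append 0 i n hi0 (by omega),
    PySem.List.pyRange_one_cons hin]
  rw [List.flatMap_append, List.flatMap_cons, List.filter_append, List.filter_cons]
  rw [hflat (PySem.List.pyRange 0 i 1)
      (fun u hu => by have := PySem.List.mem_pyRange_one.mp hu; omega),
    hflat (PySem.List.pyRange (i + 1) n 1)
      (fun u hu => by have := PySem.List.mem_pyRange_one.mp hu; omega)]
  have h1 : (PySem.List.pyRange 0 i 1).flatMap (fun u => if u < i then [u] else [])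
      = PySem.List.pyRange 0 i 1 := by
    rw [List.flatMap_congr (g := fun u => [u])]
    · exact List.flatMap_singleton' _
    · intro u hu
      have := PySem.List.mem_pyRange_one.mp hu
      rw [if_pos (by omega)]
  have h2 : (PySem.List.pyRange (i + 1) n 1).flatMap (fun u => if u < i then [u] else [])
      = [] := by
    rw [List.flatMap_congr (g := fun _ => [])]
    · simp
    · intro u hu
      have := PySem.List.mem_pyRange_one.mp hu
      rw [if_neg (by omega)]
  have h3 : (PySem.List.pyRange 0 i 1).filter (fun j => j != i)
      = PySem.List.pyRange 0 i 1 := by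
    apply List.filter_eq_self.mpr
    intro u hu
    have := PySem.List.mem_pyRange_one.mp hu
    simp; omega
  have h4 : (PySem.List.pyRange (i + 1) n 1).filter (fun j => j != i)
      = PySem.List.pyRange (i + 1) n 1 := by
    apply List.filter_eq_self.mpr
    intro u hu
    have := PySem.List.mem_pyRange_one.mp hu
    simp; omega
  rw [h1, h2, h3, h4]
  have hii : ((fun e : Int × Int => if e.1 = i then some e.2 else if e.2 = i then some e.1 else none)
      ∘ fun v => (i, v)) = fun v => some v := by funext v; simp
  rw [List.filterMap_map, hii]
  simp

-- evaluate B on a valid kind: items of the fold, in map form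
theorem alt_eval (kind : String) (n : Int) :
    ((altEdges kind n).foldl addEdge
      ((PySem.List.pyRange 0 n 1).foldl (fun d i => d.insert i ([] : List Int))
        PySem.Dict.empty)).items
    = (PySem.List.pyRange 0 n 1).map fun i => (i, nbOf (altEdges kind n) i) := by
  have hinit : (PySem.List.pyRange 0 n 1).foldl (fun d i => d.insert i ([] : List Int))
      PySem.Dict.empty
      = PySem.Dict.mk ((PySem.List.pyRange 0 n 1).map fun i => (i, [])) := by
    have := foldl_insert_mk (PySem.List.pyRange 0 n 1) []
      (PySem.List.nodup_pyRange_one 0 n) (by intro i _ p hp; cases hp)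
    simpa [PySem.Dict.empty] using this
  have hes : ∀ e ∈ altEdges kind n, e.1 ∈ PySem.List.pyRange 0 n 1 ∧
      e.2 ∈ PySem.List.pyRange 0 n 1 ∧ e.1 ≠ e.2 := by
    intro e he
    unfold altEdges at he
    split at he
    · obtain ⟨u, hu, rfl⟩ := List.mem_map.mp he
      have := PySem.List.mem_pyRange_one.mp hu
      refine ⟨PySem.List.mem_pyRange_one.mpr (by omega),
        PySem.List.mem_pyRange_one.mpr (by omega), by omega⟩
    · obtain ⟨u, hu, he'⟩ := List.mem_flatMap.mp he
      obtain ⟨v, hv, rfl⟩ := List.mem_map.mp he'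
      have h1 := PySem.List.mem_pyRange_one.mp hu
      have h2 := PySem.List.mem_pyRange_one.mp hv
      refine ⟨PySem.List.mem_pyRange_one.mpr (by omega),
        PySem.List.mem_pyRange_one.mpr (by omega), by omega⟩
  rw [hinit, foldl_addEdge_mk_map (altEdges kind n) _ (fun _ => []) hes]
  simp

-- ===== VERDICT (by name: the statement is the Claim_ definition above) =====
theorem build_topology_spec : Claim_equal_build_topology := by
  intro kind n _ hpre
  unfold Spec_build_topology build_topology build_topology_alt
  rcases hpre with rfl | rfl
  · rw [if_pos (by decide), if_pos (by decide), alt_eval]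
    apply List.map_congr_left
    intro i hi
    have := PySem.List.mem_pyRange_one.mp hi
    have h := nbOf_line n i this.1 this.2
    unfold altEdges
    rw [if_pos (by decide), h]
  · rw [if_neg (by decide), if_pos (by decide), if_pos (by decide), alt_eval]
    apply List.map_congr_left
    intro i hi
    have := PySem.List.mem_pyRange_one.mp hi
    have h := nbOf_mesh n i this.1 this.2
    unfold altEdges
    rw [if_neg (by decide), h]
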